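-- pv_equiv track=rewrite | github.com/iamseungpil/arc-agi-3-symbolica-bestiary | agents/templates/agentica_simple/state.py | _change_bbox
-- ===== SOURCE A (Python) =====
-- def _change_bbox(before: list[list[int]], after: list[list[int]]) -> dict[str, int] | None:
--     min_x = min_y = None
--     max_x = max_y = None
--     max_rows = min(len(before), len(after))
--     max_cols = min(len(before[0]) if before else 0, len(after[0]) if after else 0)
--     for y in range(max_rows):
--         for x in range(max_cols):
--             if int(before[y][x]) == int(after[y][x]):
--                 continue
--             min_x = x if min_x is None else min(min_x, x)
--             min_y = y if min_y is None else min(min_y, y)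
--             max_x = x if max_x is None else max(max_x, x)
--             max_y = y if max_y is None else max(max_y, y)
--     if min_x is None:
--         return None
--     return {"min_x": min_x, "min_y": min_y, "max_x": max_x, "max_y": max_y}
-- ===== SOURCE B (Python) =====
-- def _change_bbox(before: list[list[int]], after: list[list[int]]) -> dict[str, int] | None:
--     rows = min(len(before), len(after))
--     cols = min(len(before[0]) if before else 0, len(after[0]) if after else 0)
--
--     def row_differs(y: int) -> bool:
--         return any(int(before[y][x]) != int(after[y][x]) for x in range(cols))
--
--     def col_differs(x: int) -> bool:
--         return any(int(before[y][x]) != int(after[y][x]) for y in range(rows))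
--
--     min_y = next((y for y in range(rows) if row_differs(y)), None)
--     if min_y is None:
--         return None
--     max_y = next(y for y in range(rows - 1, -1, -1) if row_differs(y))
--     min_x = next(x for x in range(cols) if col_differs(x))
--     max_x = next(x for x in range(cols - 1, -1, -1) if col_differs(x))
--     return {"min_x": min_x, "min_y": min_y, "max_x": max_x, "max_y": max_y}
-- ===== Notes on version B (the rewrite author's own statement) =====
-- stated objective: alternative
-- what changed: Replaces the single row-major scan with four running Optional min/max accumulators by four independent directional boundary searches with early exit: first/last differing row (row-major forward/backward) and first/last differing column (column-major forward/backward).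
import Mathlib
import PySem

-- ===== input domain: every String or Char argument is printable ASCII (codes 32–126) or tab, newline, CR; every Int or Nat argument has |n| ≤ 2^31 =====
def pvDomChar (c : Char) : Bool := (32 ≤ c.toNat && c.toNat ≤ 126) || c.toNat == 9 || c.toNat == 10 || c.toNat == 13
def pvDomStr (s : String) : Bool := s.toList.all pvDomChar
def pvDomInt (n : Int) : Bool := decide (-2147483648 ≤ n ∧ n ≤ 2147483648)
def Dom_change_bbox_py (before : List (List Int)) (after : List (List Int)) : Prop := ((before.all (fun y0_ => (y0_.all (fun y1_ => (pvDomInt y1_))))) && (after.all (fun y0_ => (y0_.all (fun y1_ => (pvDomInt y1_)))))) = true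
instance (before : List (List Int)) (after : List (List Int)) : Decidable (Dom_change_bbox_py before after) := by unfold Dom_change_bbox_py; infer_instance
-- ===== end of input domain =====

-- B replaces A's single row-major scan with four Optional running min/max accumulators by four
-- independent directional boundary searches (first/last differing row, first/last differing column).
-- A raises IndexError on ragged grids (a scanned row shorter than the first-row column count); Pre_ excludes those.

-- shared cell access: grid[y][x] (in range on every input admitted by Pre_)
def pvCell (g : List (List Int)) (y x : Nat) : Int :=
  (PySem.List.pyGet? ((PySem.List.pyGet? g (y : Int)).getD []) (x : Int)).getD 0

-- ===== PORT A =====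
def change_bbox_py (before : List (List Int)) (after : List (List Int)) : Option (List (String × Int)) :=
  let maxRows := min before.length after.length
  let maxCols := min (match before with | [] => 0 | r :: _ => r.length)
                     (match after with | [] => 0 | r :: _ => r.length)
  let st : Option Int × Option Int × Option Int × Option Int :=
    (List.range maxRows).foldl (fun s y =>
      (List.range maxCols).foldl (fun s x =>
        if pvCell before y x = pvCell after y x then s
        else
          (some (match s.1 with | none => (x : Int) | some v => min v (x : Int)),
           some (match s.2.1 with | none => (y : Int) | some v => min v (y : Int)),
           some (match s.2.2.1 with | none => (x : Int) | some v => max v (x : Int)),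
           some (match s.2.2.2 with | none => (y : Int) | some v => max v (y : Int)))) s)
      (none, none, none, none)
  match st with
  | (some mnx, some mny, some mxx, some mxy) =>
      some [("min_x", mnx), ("min_y", mny), ("max_x", mxx), ("max_y", mxy)]
  | _ => none

-- ===== PORT B =====
-- Source B's row_differs / col_differs, over abstract cell functions
def pvRowDiffers (cB cA : Nat → Nat → Int) (C : Nat) (y : Nat) : Bool :=
  (List.range C).any (fun x => cB y x != cA y x)
def pvColDiffers (cB cA : Nat → Nat → Int) (R : Nat) (x : Nat) : Bool :=
  (List.range R).any (fun y => cB y x != cA y x)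

-- next(…) over range(n-1,-1,-1) is ported as find? over (List.range n).reverse; the three
-- unguarded next() calls cannot fail once a differing row exists, so .getD 0 is never the default.
def change_bbox_py_alt (before : List (List Int)) (after : List (List Int)) : Option (List (String × Int)) :=
  let rows := min before.length after.length
  let cols := min (match before with | [] => 0 | r :: _ => r.length)
                  (match after with | [] => 0 | r :: _ => r.length)
  match (List.range rows).find? (pvRowDiffers (pvCell before) (pvCell after) cols) with
  | none => none
  | some mny =>
      let mxy := ((List.range rows).reverse.find? (pvRowDiffers (pvCell before) (pvCell after) cols)).getD 0
      let mnx := ((List.range cols).find? (pvColDiffers (pvCell before) (pvCell after) rows)).getD 0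
      let mxx := ((List.range cols).reverse.find? (pvColDiffers (pvCell before) (pvCell after) rows)).getD 0
      some [("min_x", (mnx : Int)), ("min_y", (mny : Int)), ("max_x", (mxx : Int)), ("max_y", (mxy : Int))]

-- ===== PRECONDITION & SPEC =====
-- Pre_ excludes exactly the ragged inputs on which Python A raises IndexError
-- (a scanned row shorter than the column count taken from the first rows).
def Pre_change_bbox_py (before : List (List Int)) (after : List (List Int)) : Prop :=
  ∀ y < min before.length after.length,
    min (match before with | [] => 0 | r :: _ => r.length)
        (match after with | [] => 0 | r :: _ => r.length) ≤ (before.getD y []).length ∧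
    min (match before with | [] => 0 | r :: _ => r.length)
        (match after with | [] => 0 | r :: _ => r.length) ≤ (after.getD y []).length
instance (before : List (List Int)) (after : List (List Int)) : Decidable (Pre_change_bbox_py before after) := by unfold Pre_change_bbox_py; infer_instance
def pvWitness_change_bbox_py : List (List Int) × List (List Int) := ([[1, 2]], [[1, 3]])

def Spec_change_bbox_py (before : List (List Int)) (after : List (List Int)) (out : Option (List (String × Int))) : Prop := out = change_bbox_py_alt before after
instance (before : List (List Int)) (after : List (List Int)) (out : Option (List (String × Int))) : Decidable (Spec_change_bbox_py before after out) := by unfold Spec_change_bbox_py; infer_instance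

-- ===== CLAIM (what is proved, stated in full; the proofs are below) =====
def Claim_equal_change_bbox_py : Prop := ∀ (before : List (List Int)) (after : List (List Int)), Dom_change_bbox_py before after → Pre_change_bbox_py before after → Spec_change_bbox_py before after (change_bbox_py before after)

-- ===== LEMMAS AND PROOFS =====

-- proof-only helpers: A's simultaneous accumulator update, and the list of differing cells
def pvUpd (s : Option Int × Option Int × Option Int × Option Int) (p : Int × Int) :
    Option Int × Option Int × Option Int × Option Int :=
  (some (match s.1 with | none => p.1 | some v => min v p.1),
   some (match s.2.1 with | none => p.2 | some v => min v p.2),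
   some (match s.2.2.1 with | none => p.1 | some v => max v p.1),
   some (match s.2.2.2 with | none => p.2 | some v => max v p.2))

def pvPts (cB cA : Nat → Nat → Int) (R C : Nat) : List (Int × Int) :=
  (List.range R).flatMap (fun y =>
    (List.range C).filterMap (fun x =>
      if cB y x ≠ cA y x then some ((x : Int), (y : Int)) else none))

-- A's nested loop is the fold of pvUpd over the differing cells
theorem pvA_fold (cB cA : Nat → Nat → Int) (R C : Nat) :
    (List.range R).foldl (fun s y =>
      (List.range C).foldl (fun s x =>
        if cB y x = cA y x then s else pvUpd s ((x : Int), (y : Int))) s)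
      (none, none, none, none)
    = (pvPts cB cA R C).foldl pvUpd (none, none, none, none) := by
  rw [pvPts, List.foldl_flatMap]
  congr 1
  funext s y
  rw [List.foldl_filterMap]
  congr 1
  funext s x
  by_cases h : cB y x = cA y x <;> simp [h]

-- folding pvUpd from an all-some state is four independent min/max folds
theorem pvFoldUpd (t : List (Int × Int)) (a b c d : Int) :
    t.foldl pvUpd (some a, some b, some c, some d)
    = (some (t.foldl (fun u p => min u p.1) a),
       some (t.foldl (fun u p => min u p.2) b),
       some (t.foldl (fun u p => max u p.1) c),
       some (t.foldl (fun u p => max u p.2) d)) := by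
  induction t generalizing a b c d with
  | nil => rfl
  | cons p t ih => simp [List.foldl_cons, pvUpd, ih]

-- membership in the differing-cell list
theorem pv_mem_pts (cB cA : Nat → Nat → Int) (R C : Nat) (q : Int × Int) :
    q ∈ pvPts cB cA R C ↔ ∃ y < R, ∃ x < C, cB y x ≠ cA y x ∧ q = ((x : Int), (y : Int)) := by
  simp [pvPts, List.mem_flatMap, List.mem_filterMap, List.mem_range]
  constructor <;> rintro ⟨y, hy, x, hx, hne, heq⟩ <;> exact ⟨y, hy, x, hx, hne, heq.symm⟩

-- find? over range returns the least index satisfying the predicate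
theorem pv_find_range (p : Nat → Bool) (n m : Nat)
    (h : (List.range n).find? p = some m) :
    m < n ∧ p m = true ∧ ∀ k < m, p k = false := by
  induction n with
  | zero => simp at h
  | succ n ih =>
    rw [List.range_succ, List.find?_append] at h
    cases hf : (List.range n).find? p with
    | some m' =>
      rw [hf] at h; simp at h; subst h
      obtain ⟨h1, h2, h3⟩ := ih hf
      exact ⟨Nat.lt_succ_of_lt h1, h2, h3⟩
    | none =>
      rw [hf] at h
      have hall : ∀ k < n, p k = false := by
        intro k hk
        have := List.find?_eq_none.mp hf k (List.mem_range.mpr hk)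
        simpa using this
      rcases hp : p n with _ | _
      · simp [List.find?, hp] at h
      · simp [List.find?, hp] at h
        subst h
        exact ⟨Nat.lt_succ_self _, hp, hall⟩

-- find? over the reversed range returns the greatest index satisfying the predicate
theorem pv_find_range_rev (p : Nat → Bool) (n m : Nat)
    (h : (List.range n).reverse.find? p = some m) :
    m < n ∧ p m = true ∧ ∀ k, m < k → k < n → p k = false := by
  induction n with
  | zero => simp at h
  | succ n ih =>
    rw [List.range_succ, List.reverse_append] at h
    simp only [List.reverse_cons, List.reverse_nil, List.nil_append, List.cons_append,
      List.find?_cons] at h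
    rcases hp : p n with _ | _
    · rw [hp] at h
      obtain ⟨h1, h2, h3⟩ := ih h
      refine ⟨Nat.lt_succ_of_lt h1, h2, fun k hk1 hk2 => ?_⟩
      rcases Nat.lt_succ_iff_lt_or_eq.mp hk2 with hk | rfl
      · exact h3 k hk1 hk
      · exact hp
    · rw [hp] at h; simp at h; subst h
      exact ⟨Nat.lt_succ_self _, hp, fun k hk1 hk2 => absurd hk2 (Nat.not_lt.mpr hk1)⟩

-- the fold-min over a nonempty list is a member and a lower bound
theorem pv_fold_min (x0 : Int) (l : List Int) :
    l.foldl min x0 ∈ x0 :: l ∧ ∀ b ∈ x0 :: l, l.foldl min x0 ≤ b := by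
  induction l generalizing x0 with
  | nil => simp
  | cons a t ih =>
    obtain ⟨hm, hb⟩ := ih (min x0 a)
    constructor
    · rcases List.mem_cons.mp hm with h | h
      · rcases min_choice x0 a with hc | hc
        · exact List.mem_cons.mpr (Or.inl (h.trans hc))
        · exact List.mem_cons_of_mem _ (List.mem_cons.mpr (Or.inl (h.trans hc)))
      · exact List.mem_cons_of_mem _ (List.mem_cons_of_mem _ h)
    · intro b hb'
      rcases List.mem_cons.mp hb' with rfl | hb'
      · exact le_trans (hb _ (List.mem_cons_self)) (min_le_left _ _)
      · rcases List.mem_cons.mp hb' with rfl | hb'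
        · exact le_trans (hb _ (List.mem_cons_self)) (min_le_right _ _)
        · exact hb _ (List.mem_cons_of_mem _ hb')

theorem pv_fold_max (x0 : Int) (l : List Int) :
    l.foldl max x0 ∈ x0 :: l ∧ ∀ b ∈ x0 :: l, b ≤ l.foldl max x0 := by
  induction l generalizing x0 with
  | nil => simp
  | cons a t ih =>
    obtain ⟨hm, hb⟩ := ih (max x0 a)
    constructor
    · rcases List.mem_cons.mp hm with h | h
      · rcases max_choice x0 a with hc | hc
        · exact List.mem_cons.mpr (Or.inl (h.trans hc))
        · exact List.mem_cons_of_mem _ (List.mem_cons.mpr (Or.inl (h.trans hc)))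
      · exact List.mem_cons_of_mem _ (List.mem_cons_of_mem _ h)
    · intro b hb'
      rcases List.mem_cons.mp hb' with rfl | hb'
      · exact le_trans (le_max_left _ _) (hb _ (List.mem_cons_self))
      · rcases List.mem_cons.mp hb' with rfl | hb'
        · exact le_trans (le_max_right _ _) (hb _ (List.mem_cons_self))
        · exact hb _ (List.mem_cons_of_mem _ hb')

theorem pv_fold_min_eq (x0 : Int) (l : List Int) (m : Int)
    (h1 : m ∈ x0 :: l) (h2 : ∀ b ∈ x0 :: l, m ≤ b) :
    l.foldl min x0 = m := by
  obtain ⟨hm, hb⟩ := pv_fold_min x0 l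
  exact le_antisymm (hb m h1) (h2 _ hm)

theorem pv_fold_max_eq (x0 : Int) (l : List Int) (m : Int)
    (h1 : m ∈ x0 :: l) (h2 : ∀ b ∈ x0 :: l, b ≤ m) :
    l.foldl max x0 = m := by
  obtain ⟨hm, hb⟩ := pv_fold_max x0 l
  exact le_antisymm (h2 _ hm) (hb m h1)

-- the central equality, over abstract cell functions
theorem pvKey (cB cA : Nat → Nat → Int) (R C : Nat) :
    (match (List.range R).foldl (fun s y =>
        (List.range C).foldl (fun s x =>
          if cB y x = cA y x then s else pvUpd s ((x : Int), (y : Int))) s)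
        ((none : Option Int), (none : Option Int), (none : Option Int), (none : Option Int)) with
     | (some mnx, some mny, some mxx, some mxy) =>
        some [("min_x", mnx), ("min_y", mny), ("max_x", mxx), ("max_y", mxy)]
     | _ => none)
    = (match (List.range R).find? (pvRowDiffers cB cA C) with
       | none => none
       | some mny =>
          let mxy := ((List.range R).reverse.find? (pvRowDiffers cB cA C)).getD 0
          let mnx := ((List.range C).find? (pvColDiffers cB cA R)).getD 0
          let mxx := ((List.range C).reverse.find? (pvColDiffers cB cA R)).getD 0
          some [("min_x", (mnx : Int)), ("min_y", (mny : Int)), ("max_x", (mxx : Int)), ("max_y", (mxy : Int))]) := by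
  rw [pvA_fold]
  -- a cell diff exists iff pts is nonempty
  rcases hpts : pvPts cB cA R C with _ | ⟨p, t⟩
  · -- no differing cell: every row test is false, find? = none, both sides none
    have hnone : (List.range R).find? (pvRowDiffers cB cA C) = none := by
      rw [List.find?_eq_none]
      intro y hy hcontra
      simp only [pvRowDiffers, List.any_eq_true, List.mem_range] at hcontra
      obtain ⟨x, hx, hne⟩ := hcontra
      have : ((x : Int), (y : Int)) ∈ pvPts cB cA R C :=
        (pv_mem_pts cB cA R C _).mpr ⟨y, List.mem_range.mp hy, x, hx, by simpa using hne, rfl⟩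
      rw [hpts] at this; simp at this
    rw [hnone]; rfl
  · -- some differing cell: find? finds a row; equate the four coordinates
    have hmem_p : p ∈ pvPts cB cA R C := by rw [hpts]; exact List.mem_cons_self
    -- every element of pts is a differing in-range cell
    have hshape : ∀ q ∈ pvPts cB cA R C,
        ∃ y < R, ∃ x < C, cB y x ≠ cA y x ∧ q = ((x : Int), (y : Int)) :=
      fun q hq => (pv_mem_pts cB cA R C q).mp hq
    obtain ⟨py, hpy, px, hpx, hpne, rfl⟩ := hshape p hmem_p
    have hrowp : pvRowDiffers cB cA C py = true := by
      simp only [pvRowDiffers, List.any_eq_true, List.mem_range]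
      exact ⟨px, hpx, by simpa using hpne⟩
    -- forward row search succeeds
    have hfind : ∃ mny, (List.range R).find? (pvRowDiffers cB cA C) = some mny := by
      cases hf : (List.range R).find? (pvRowDiffers cB cA C) with
      | none =>
        have := List.find?_eq_none.mp hf py (List.mem_range.mpr hpy)
        exact absurd hrowp (by simpa using this)
      | some v => exact ⟨v, rfl⟩
    obtain ⟨mny, hmny⟩ := hfind
    -- the three other searches succeed too
    have hcolp : pvColDiffers cB cA R px = true := by
      simp only [pvColDiffers, List.any_eq_true, List.mem_range]
      exact ⟨py, hpy, by simpa using hpne⟩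
    have hrev : ∃ mxy, (List.range R).reverse.find? (pvRowDiffers cB cA C) = some mxy := by
      cases hf : (List.range R).reverse.find? (pvRowDiffers cB cA C) with
      | none =>
        have := List.find?_eq_none.mp hf py (by simp [List.mem_range, hpy])
        exact absurd hrowp (by simpa using this)
      | some v => exact ⟨v, rfl⟩
    obtain ⟨mxy, hmxy⟩ := hrev
    have hfwd : ∃ mnx, (List.range C).find? (pvColDiffers cB cA R) = some mnx := by
      cases hf : (List.range C).find? (pvColDiffers cB cA R) with
      | none =>
        have := List.find?_eq_none.mp hf px (List.mem_range.mpr hpx)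
        exact absurd hcolp (by simpa using this)
      | some v => exact ⟨v, rfl⟩
    obtain ⟨mnx, hmnx⟩ := hfwd
    have hrev' : ∃ mxx, (List.range C).reverse.find? (pvColDiffers cB cA R) = some mxx := by
      cases hf : (List.range C).reverse.find? (pvColDiffers cB cA R) with
      | none =>
        have := List.find?_eq_none.mp hf px (by simp [List.mem_range, hpx])
        exact absurd hcolp (by simpa using this)
      | some v => exact ⟨v, rfl⟩
    obtain ⟨mxx, hmxx⟩ := hrev'
    -- characterize the four found indices
    obtain ⟨hmnyR, hmnyP, hmnyL⟩ := pv_find_range _ _ _ hmny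
    obtain ⟨hmxyR, hmxyP, hmxyG⟩ := pv_find_range_rev _ _ _ hmxy
    obtain ⟨hmnxC, hmnxP, hmnxL⟩ := pv_find_range _ _ _ hmnx
    obtain ⟨hmxxC, hmxxP, hmxxG⟩ := pv_find_range_rev _ _ _ hmxx
    -- a witness cell in each extremal row/column, hence membership in pts
    have hwit_row : ∀ y, pvRowDiffers cB cA C y = true → y < R →
        ((y : Int)) ∈ ((px : Int), (py : Int)).2 :: t.map Prod.snd := by
      intro y hrd hyR
      simp only [pvRowDiffers, List.any_eq_true, List.mem_range] at hrd
      obtain ⟨x, hx, hne⟩ := hrd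
      have : ((x : Int), (y : Int)) ∈ pvPts cB cA R C :=
        (pv_mem_pts cB cA R C _).mpr ⟨y, hyR, x, hx, by simpa using hne, rfl⟩
      rw [hpts] at this
      rcases List.mem_cons.mp this with h | h
      · have hy2 : (y : Int) = (py : Int) := congrArg Prod.snd h
        rw [hy2]; exact List.mem_cons_self
      · exact List.mem_cons_of_mem _ (List.mem_map.mpr ⟨_, h, rfl⟩)
    have hwit_col : ∀ x, pvColDiffers cB cA R x = true → x < C →
        ((x : Int)) ∈ ((px : Int), (py : Int)).1 :: t.map Prod.fst := by
      intro x hcd hxC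
      simp only [pvColDiffers, List.any_eq_true, List.mem_range] at hcd
      obtain ⟨y, hy, hne⟩ := hcd
      have : ((x : Int), (y : Int)) ∈ pvPts cB cA R C :=
        (pv_mem_pts cB cA R C _).mpr ⟨y, hy, x, hxC, by simpa using hne, rfl⟩
      rw [hpts] at this
      rcases List.mem_cons.mp this with h | h
      · have hx2 : (x : Int) = (px : Int) := congrArg Prod.fst h
        rw [hx2]; exact List.mem_cons_self
      · exact List.mem_cons_of_mem _ (List.mem_map.mpr ⟨_, h, rfl⟩)
    -- every coordinate appearing in the fold lists comes from a differing in-range cell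
    have hbx : ∀ b ∈ ((px : Int), (py : Int)).1 :: t.map Prod.fst,
        ∃ x < C, b = (x : Int) ∧ pvColDiffers cB cA R x = true := by
      intro b hb
      rcases List.mem_cons.mp hb with rfl | hb
      · exact ⟨px, hpx, rfl, hcolp⟩
      · obtain ⟨q, hq, rfl⟩ := List.mem_map.mp hb
        obtain ⟨y, hyR, x, hxC, hne, heq⟩ :=
          hshape q (by rw [hpts]; exact List.mem_cons_of_mem _ hq)
        refine ⟨x, hxC, by rw [heq], ?_⟩
        simp only [pvColDiffers, List.any_eq_true, List.mem_range]
        exact ⟨y, hyR, by simpa using hne⟩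
    have hby : ∀ b ∈ ((px : Int), (py : Int)).2 :: t.map Prod.snd,
        ∃ y < R, b = (y : Int) ∧ pvRowDiffers cB cA C y = true := by
      intro b hb
      rcases List.mem_cons.mp hb with rfl | hb
      · exact ⟨py, hpy, rfl, hrowp⟩
      · obtain ⟨q, hq, rfl⟩ := List.mem_map.mp hb
        obtain ⟨y, hyR, x, hxC, hne, heq⟩ :=
          hshape q (by rw [hpts]; exact List.mem_cons_of_mem _ hq)
        refine ⟨y, hyR, by rw [heq], ?_⟩
        simp only [pvRowDiffers, List.any_eq_true, List.mem_range]
        exact ⟨x, hxC, by simpa using hne⟩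
    -- bounds for arbitrary coordinates against the extremal indices
    have hx_ge : ∀ b ∈ ((px : Int), (py : Int)).1 :: t.map Prod.fst, (mnx : Int) ≤ b := by
      intro b hb
      obtain ⟨x, hxC, rfl, hcd⟩ := hbx b hb
      have hnlt : ¬ x < mnx := fun hlt => absurd hcd (by simp [hmnxL x hlt])
      exact_mod_cast Nat.not_lt.mp hnlt
    have hx_le : ∀ b ∈ ((px : Int), (py : Int)).1 :: t.map Prod.fst, b ≤ (mxx : Int) := by
      intro b hb
      obtain ⟨x, hxC, rfl, hcd⟩ := hbx b hb
      have hnlt : ¬ mxx < x := fun hlt => absurd hcd (by simp [hmxxG x hlt hxC])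
      exact_mod_cast Nat.not_lt.mp hnlt
    have hy_ge : ∀ b ∈ ((px : Int), (py : Int)).2 :: t.map Prod.snd, (mny : Int) ≤ b := by
      intro b hb
      obtain ⟨y, hyR, rfl, hrd⟩ := hby b hb
      have hnlt : ¬ y < mny := fun hlt => absurd hrd (by simp [hmnyL y hlt])
      exact_mod_cast Nat.not_lt.mp hnlt
    have hy_le : ∀ b ∈ ((px : Int), (py : Int)).2 :: t.map Prod.snd, b ≤ (mxy : Int) := by
      intro b hb
      obtain ⟨y, hyR, rfl, hrd⟩ := hby b hb
      have hnlt : ¬ mxy < y := fun hlt => absurd hrd (by simp [hmxyG y hlt hyR])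
      exact_mod_cast Nat.not_lt.mp hnlt
    -- the four fold values equal the four extremal indices
    have emnx : (t.map Prod.fst).foldl min ((px : Int), (py : Int)).1 = (mnx : Int) :=
      pv_fold_min_eq _ _ _ (hwit_col mnx hmnxP hmnxC) hx_ge
    have emxx : (t.map Prod.fst).foldl max ((px : Int), (py : Int)).1 = (mxx : Int) :=
      pv_fold_max_eq _ _ _ (hwit_col mxx hmxxP hmxxC) hx_le
    have emny : (t.map Prod.snd).foldl min ((px : Int), (py : Int)).2 = (mny : Int) :=
      pv_fold_min_eq _ _ _ (hwit_row mny hmnyP hmnyR) hy_ge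
    have emxy : (t.map Prod.snd).foldl max ((px : Int), (py : Int)).2 = (mxy : Int) :=
      pv_fold_max_eq _ _ _ (hwit_row mxy hmxyP hmxyR) hy_le
    -- now compute both sides
    rw [List.foldl_cons]
    have h0 : pvUpd ((none : Option Int), (none : Option Int), (none : Option Int), (none : Option Int))
        ((px : Int), (py : Int)) = (some (px : Int), some (py : Int), some (px : Int), some (py : Int)) := rfl
    rw [h0, pvFoldUpd, hmny, hmxy, hmnx, hmxx]
    simp only [← List.foldl_map (f := Prod.fst) (g := min), ← List.foldl_map (f := Prod.snd) (g := min),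
      ← List.foldl_map (f := Prod.fst) (g := max), ← List.foldl_map (f := Prod.snd) (g := max)] at *
    simp [emnx, emxx, emny, emxy]

-- ===== VERDICT (by name: the statement is the Claim_ definition above) =====
theorem change_bbox_py_spec : Claim_equal_change_bbox_py := by
  intro before after hd hp
  clear hd hp
  show change_bbox_py before after = change_bbox_py_alt before after
  rw [change_bbox_py.eq_def, change_bbox_py_alt.eq_def]
  exact pvKey (fun y x => pvCell before y x) (fun y x => pvCell after y x)
    (min before.length after.length)
    (min (match before with | [] => 0 | r :: _ => r.length)
         (match after with | [] => 0 | r :: _ => r.length))
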